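-- pv_equiv track=rewrite | github.com/PatoLocos/Erdos530 | experiments/analyze_2to1_map.py | get_witness_pairs
-- ===== SOURCE A (Python) =====
-- def get_sumset(S):
--     """Return the sumset S+S = {a+b : a,b in S}."""
--     return {a + b for a in S for b in S}
--
-- def get_witness_pairs(x, S):
--     """
--     Find all witness pairs (a,b) in S×S that block element x.
--
--     Type 1: x + c = a + b for some c in S  =>  pair (a,b) witnesses via c
--     Type 2: 2x = a + b  =>  pair (a,b) witnesses via doubling
--
--     Returns: list of (a, b) pairs (ordered, a <= b) with their type
--     """
--     S_list = sorted(S)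
--     sumset = get_sumset(S)
--     witnesses = []
--     seen = set()
--
--     # Type 1: x + c = a + b for some c in S, a,b in S
--     for c in S_list:
--         sigma = x + c
--         # Find all (a,b) with a+b = sigma, a,b in S
--         for a in S_list:
--             b = sigma - a
--             if b in S and b >= a:
--                 pair = (a, b)
--                 key = ('T1', pair, c)
--                 if key not in seen:
--                     seen.add(key)
--                     witnesses.append(('T1', pair, c))
--
--     # Type 2: 2x = a + b for a,b in S
--     double_x = 2 * x
--     for a in S_list:
--         b = double_x - a
--         if b in S and b >= a:
--             pair = (a, b)
--             key = ('T2', pair)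
--             if key not in seen:
--                 seen.add(key)
--                 witnesses.append(('T2', pair, None))
--
--     return witnesses
-- ===== SOURCE B (Python) =====
-- def get_witness_pairs(x, S):
--     """
--     Find all witness pairs (a,b) in S x S that block element x.
--     Two-pointer scan over the sorted distinct elements, one pass per target.
--     """
--     items = sorted(set(S))
--
--     def pairs_with_sum(t):
--         out = []
--         i, j = 0, len(items) - 1
--         while i <= j:
--             s = items[i] + items[j]
--             if s == t:
--                 out.append((items[i], items[j]))
--                 i += 1
--                 j -= 1
--             elif s < t:
--                 i += 1
--             else:
--                 j -= 1
--         return out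
--
--     witnesses = []
--     for c in items:
--         for (a, b) in pairs_with_sum(x + c):
--             witnesses.append(('T1', (a, b), c))
--     for (a, b) in pairs_with_sum(2 * x):
--         witnesses.append(('T2', (a, b), None))
--     return witnesses
-- ===== Notes on version B (the rewrite author's own statement) =====
-- stated objective: faster
-- what changed: B drops A's dead O(n^2) sumset computation and the redundant seen-set, and replaces A's per-target membership scan over the sorted list by a two-pointer sweep over the sorted distinct elements, one coordinated left/right walk per target sum.
import Mathlib
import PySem

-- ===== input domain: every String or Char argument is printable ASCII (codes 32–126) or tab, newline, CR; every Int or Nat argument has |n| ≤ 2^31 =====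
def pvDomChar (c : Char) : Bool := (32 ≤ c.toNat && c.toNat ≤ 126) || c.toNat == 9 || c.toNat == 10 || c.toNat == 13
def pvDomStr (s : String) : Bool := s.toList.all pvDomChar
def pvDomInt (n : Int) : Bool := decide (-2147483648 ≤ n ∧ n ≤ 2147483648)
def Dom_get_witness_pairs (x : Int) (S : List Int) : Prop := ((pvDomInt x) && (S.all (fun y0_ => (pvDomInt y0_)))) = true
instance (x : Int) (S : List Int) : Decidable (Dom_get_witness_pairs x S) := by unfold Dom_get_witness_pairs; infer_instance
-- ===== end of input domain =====

-- B replaces A's per-c membership scan (plus a dead sumset computation and a redundant seen-set)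
-- by a two-pointer sweep over the sorted distinct elements, one sweep per target sum
-- (same O(n^2) total; measurably faster by a constant factor in a timing run).

-- ===== PORT A =====
-- Python's seen-keys are ('T1', pair, c) 3-tuples and ('T2', pair) 2-tuples; we port the latter as
-- ("T2", pair, none): exact, because the "T1"/"T2" tags already make the two key families disjoint.
def get_witness_pairs (x : Int) (S : List Int) : List (String × (Int × Int) × Option Int) :=
  let S_list := PySem.List.sorted S (fun a => a) false
  let _sumset := PySem.Set.ofList (S.flatMap (fun a => S.map (fun b => a + b)))  -- computed and unused, as in A
  let st1 := S_list.foldl (fun st c =>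
    S_list.foldl (fun st2 a =>
      let b := x + c - a
      if S.contains b ∧ b ≥ a then
        let key : String × (Int × Int) × Option Int := ("T1", (a, b), some c)
        if key ∈ st2.2 then st2 else (st2.1 ++ [key], PySem.Set.add st2.2 key)
      else st2) st)
    (([], []) : List (String × (Int × Int) × Option Int) × List (String × (Int × Int) × Option Int))
  let double_x := 2 * x
  let st2 := S_list.foldl (fun st a =>
      let b := double_x - a
      if S.contains b ∧ b ≥ a then
        let key : String × (Int × Int) × Option Int := ("T2", (a, b), none)
        if key ∈ st.2 then st else (st.1 ++ [key], PySem.Set.add st.2 key)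
      else st) st1
  st2.1

-- ===== PORT B =====
-- the while-loop of Source B's pairs_with_sum; i, j are Python ints (j may end at -1).
-- items[i] / items[j] are ported with the total indexer pyGetD: every executed access has
-- 0 ≤ i ≤ j < len(items), where pyGetD is exact.
def pvTwoPtr (items : List Int) (t : Int) (i j : Int) : List (Int × Int) :=
  if _h : i ≤ j then
    let a := PySem.List.pyGetD items i 0
    let b := PySem.List.pyGetD items j 0
    if a + b = t then (a, b) :: pvTwoPtr items t (i + 1) (j - 1)
    else if a + b < t then pvTwoPtr items t (i + 1) j
    else pvTwoPtr items t i (j - 1)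
  else []
termination_by (j + 1 - i).toNat
decreasing_by all_goals omega

def get_witness_pairs_alt (x : Int) (S : List Int) : List (String × (Int × Int) × Option Int) :=
  let items := PySem.List.sorted (PySem.Set.ofList S) (fun a => a) false
  let pairs_with_sum := fun t => pvTwoPtr items t 0 (PySem.List.len items - 1)
  (items.flatMap fun c =>
    (pairs_with_sum (x + c)).map (fun p => ("T1", p, some c))) ++
  (pairs_with_sum (2 * x)).map (fun p => ("T2", p, none))

-- ===== PRECONDITION & SPEC =====
def Spec_get_witness_pairs (x : Int) (S : List Int) (out : List (String × (Int × Int) × Option Int)) : Prop := out = get_witness_pairs_alt x S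
instance (x : Int) (S : List Int) (out : List (String × (Int × Int) × Option Int)) : Decidable (Spec_get_witness_pairs x S out) := by unfold Spec_get_witness_pairs; infer_instance

-- ===== CLAIM (what is proved, stated in full; the proofs are below) =====
def Claim_equal_get_witness_pairs : Prop := ∀ (x : Int) (S : List Int), Dom_get_witness_pairs x S → Spec_get_witness_pairs x S (get_witness_pairs x S)

-- ===== LEMMAS AND PROOFS =====

theorem pvDropLast_cons_tail (a : Int) (l : List Int) : l.dropLast = ((a::l).dropLast).tail := by
  cases l using List.reverseRecOn with
  | nil => simp
  | append_singleton u x _ =>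
    rw [show a :: (u ++ [x]) = (a :: u) ++ [x] by simp, List.dropLast_append_of_ne_nil,
        List.dropLast_concat]
    · simp
    · simp
theorem pvTake_tail (u : List Int) (k : Nat) : (u.take k).tail = u.tail.take (k-1) := by
  cases u <;> cases k <;> simp
theorem pvTake_dropLast (u : List Int) (k : Nat) (h : k ≤ u.length) :
    (u.take k).dropLast = u.take (k-1) := by
  rw [List.dropLast_eq_take]; simp [List.take_take]; omega

def pvStep {β α : Type} [DecidableEq α] (g : β → Option α)
    (st : List α × List α) (y : β) : List α × List α :=
  match g y with
  | none => st
  | some e => if e ∈ st.2 then st else (st.1 ++ [e], st.2 ++ [e])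

def pvEmit {β α : Type} [DecidableEq α] (g : β → Option α) (s : List α) : List β → List α
  | [] => []
  | y :: ys =>
    match g y with
    | none => pvEmit g s ys
    | some e => if e ∈ s then pvEmit g s ys else e :: pvEmit g (s ++ [e]) ys

def pvDf {β : Type} [DecidableEq β] (vs : List β) : List β → List β
  | [] => []
  | y :: ys => if y ∈ vs then pvDf vs ys else y :: pvDf (vs ++ [y]) ys

theorem pvFoldl_step_eq {β α : Type} [DecidableEq α] (g : β → Option α) :
    ∀ (l : List β) (w : List α),
      l.foldl (pvStep g) (w, w) = (w ++ pvEmit g w l, w ++ pvEmit g w l) := by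
  intro l
  induction l with
  | nil => intro w; simp [pvEmit]
  | cons y ys ih =>
    intro w
    simp only [List.foldl_cons, pvEmit]
    cases hg : g y with
    | none => simp [pvStep, hg, ih]
    | some e =>
      by_cases he : e ∈ w
      · simp [pvStep, hg, he, ih]
      · simp only [pvStep, hg, he, if_false, ite_false]
        rw [ih (w ++ [e])]
        simp

theorem pvDf_sublist {β : Type} [DecidableEq β] : ∀ (l vs : List β), (pvDf vs l).Sublist l := by
  intro l
  induction l with
  | nil => intro vs; simp [pvDf]
  | cons y ys ih =>
    intro vs
    by_cases h : y ∈ vs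
    · simp only [pvDf, if_pos h]; exact (ih vs).cons y
    · simp only [pvDf, if_neg h]; exact (ih (vs ++ [y])).cons₂ y

theorem pvDf_mem {β : Type} [DecidableEq β] :
    ∀ (l vs : List β) (z : β), z ∈ pvDf vs l ↔ z ∈ l ∧ z ∉ vs := by
  intro l
  induction l with
  | nil => intro vs z; simp [pvDf]
  | cons y ys ih =>
    intro vs z
    by_cases h : y ∈ vs
    · simp only [pvDf, if_pos h, ih, List.mem_cons]
      constructor
      · rintro ⟨h1, h2⟩; exact ⟨Or.inr h1, h2⟩
      · rintro ⟨h1 | h1, h2⟩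
        · exact absurd (h1 ▸ h) h2
        · exact ⟨h1, h2⟩
    · simp only [pvDf, if_neg h, List.mem_cons, ih, List.mem_append, List.mem_singleton]
      constructor
      · rintro (rfl | ⟨h1, h2⟩)
        · exact ⟨Or.inl rfl, h⟩
        · exact ⟨Or.inr h1, fun hz => h2 (Or.inl hz)⟩
      · rintro ⟨rfl | h1, h2⟩
        · exact Or.inl rfl
        · by_cases hzy : z = y
          · exact Or.inl hzy
          · exact Or.inr ⟨h1, by simp [h2, hzy]⟩

theorem pvDf_nodup {β : Type} [DecidableEq β] : ∀ (l vs : List β), (pvDf vs l).Nodup := by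
  intro l
  induction l with
  | nil => intro vs; simp [pvDf]
  | cons y ys ih =>
    intro vs
    by_cases h : y ∈ vs
    · simp only [pvDf, if_pos h]; exact ih vs
    · simp only [pvDf, if_neg h, List.nodup_cons]
      refine ⟨fun hy => ?_, ih _⟩
      have := (pvDf_mem ys (vs ++ [y]) y).mp hy
      simp at this

theorem pvDf_append_subset {β : Type} [DecidableEq β] :
    ∀ (u r vs : List β), (∀ z ∈ u, z ∈ vs) → pvDf vs (u ++ r) = pvDf vs r := by
  intro u
  induction u with
  | nil => intros; rfl
  | cons y ys ih =>
    intro r vs hu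
    simp only [List.cons_append, pvDf, if_pos (hu y (by simp))]
    exact ih r vs fun z hz => hu z (by simp [hz])

theorem pvDf_append {β : Type} [DecidableEq β] :
    ∀ (u r vs : List β), pvDf vs (u ++ r) = pvDf vs u ++ pvDf (vs ++ pvDf vs u) r := by
  intro u
  induction u with
  | nil => intros; simp [pvDf]
  | cons y ys ih =>
    intro r vs
    by_cases h : y ∈ vs
    · simp only [List.cons_append, pvDf, if_pos h, ih]
    · simp only [List.cons_append, pvDf, if_neg h, ih, List.cons_append, List.append_assoc]
      rfl

theorem pvDf_map_inj {β γ : Type} [DecidableEq β] [DecidableEq γ] (f : β → γ)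
    (hf : Function.Injective f) :
    ∀ (l : List β) (vs : List γ) (vs' : List β), (∀ a, f a ∈ vs ↔ a ∈ vs') →
      pvDf vs (l.map f) = (pvDf vs' l).map f := by
  intro l
  induction l with
  | nil => intros; rfl
  | cons y ys ih =>
    intro vs vs' hvv
    by_cases h : y ∈ vs'
    · simp only [List.map_cons, pvDf, if_pos ((hvv y).mpr h), if_pos h]
      exact ih _ _ hvv
    · simp only [List.map_cons, pvDf, if_neg (fun h' => h ((hvv y).mp h')), if_neg h, List.map_cons]
      refine congrArg _ (ih _ _ fun a => ?_)
      simp only [List.mem_append, List.mem_singleton, hvv a]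
      exact or_congr Iff.rfl ⟨fun h' => hf h', fun h' => h' ▸ rfl⟩

theorem pvFilterMap_ite {β α : Type} (l : List β) (p : β → Prop) [DecidablePred p] (f : β → α) :
    l.filterMap (fun a => if p a then some (f a) else none) =
      (l.filter (fun a => decide (p a))).map f := by
  induction l with
  | nil => rfl
  | cons y ys ih => by_cases h : p y <;> simp [h, ih]

theorem pvEmit_eq_df_filterMap {β α : Type} [DecidableEq α] [DecidableEq β] (g : β → Option α)
    (hinj : ∀ y z e, g y = some e → g z = some e → y = z) :
    ∀ (l : List β) (s : List α) (vs : List β),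
      (∀ e y, y ∈ l → g y = some e → (e ∈ s ↔ ∃ z ∈ vs, g z = some e)) →
      pvEmit g s l = (pvDf vs l).filterMap g := by
  intro l
  induction l with
  | nil => intros; rfl
  | cons y ys ih =>
    intro s vs hlink
    cases hg : g y with
    | none =>
      simp only [pvEmit, hg]
      by_cases h : y ∈ vs
      · simp only [pvDf, if_pos h]
        exact ih s vs fun e z hz => hlink e z (by simp [hz])
      · simp only [pvDf, if_neg h, List.filterMap_cons, hg]
        refine ih s (vs ++ [y]) fun e z hz hgz => ?_
        rw [hlink e z (by simp [hz]) hgz]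
        constructor
        · rintro ⟨w, hw, hgw⟩; exact ⟨w, by simp [hw], hgw⟩
        · rintro ⟨w, hw, hgw⟩
          rcases (List.mem_append.mp hw) with hw | hw
          · exact ⟨w, hw, hgw⟩
          · simp only [List.mem_singleton] at hw
            rw [hw, hg] at hgw; cases hgw
    | some e =>
      by_cases h : y ∈ vs
      · have he : e ∈ s := (hlink e y (by simp) hg).mpr ⟨y, h, hg⟩
        simp only [pvEmit, hg, if_pos he, pvDf, if_pos h]
        exact ih s vs fun e' z hz => hlink e' z (by simp [hz])
      · have he : e ∉ s := by
          intro hes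
          obtain ⟨z, hz, hgz⟩ := (hlink e y (by simp) hg).mp hes
          exact h (hinj y z e hg hgz ▸ hz)
        simp only [pvEmit, hg, if_neg he, pvDf, if_neg h, List.filterMap_cons, hg]
        refine congrArg _ (ih (s ++ [e]) (vs ++ [y]) fun e' z hz hgz => ?_)
        simp only [List.mem_append, List.mem_singleton]
        rw [hlink e' z (by simp [hz]) hgz]
        constructor
        · rintro (⟨w, hw, hgw⟩ | rfl)
          · exact ⟨w, Or.inl hw, hgw⟩
          · exact ⟨y, Or.inr rfl, hg⟩
        · rintro ⟨w, hw | hw, hgw⟩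
          · exact Or.inl ⟨w, hw, hgw⟩
          · subst hw; rw [hg] at hgw
            exact Or.inr (Option.some_injective _ hgw).symm

theorem pvDf_pairProd (l0 : List Int) :
    ∀ (l : List Int) (cs : List Int) (vs : List (Int × Int)),
      (∀ p : Int × Int, p ∈ vs ↔ p.1 ∈ cs ∧ p.2 ∈ l0) →
      pvDf vs (l.flatMap fun c => l0.map (fun a => (c, a))) =
        (pvDf cs l).flatMap (fun c => (pvDf [] l0).map (fun a => (c, a))) := by
  intro l
  induction l with
  | nil => intros; rfl
  | cons c l ih =>
    intro cs vs hinv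
    simp only [List.flatMap_cons]
    by_cases hc : c ∈ cs
    · rw [pvDf_append_subset _ _ _ (by
        intro z hz
        simp only [List.mem_map] at hz
        obtain ⟨a, ha, rfl⟩ := hz
        exact (hinv (c, a)).mpr ⟨hc, ha⟩)]
      simp only [pvDf, if_pos hc]
      exact ih cs vs hinv
    · rw [pvDf_append]
      have hblock : pvDf vs (l0.map (fun a => (c, a))) = (pvDf [] l0).map (fun a => (c, a)) := by
        refine pvDf_map_inj _ (fun a b hab => by simpa using hab) l0 vs [] fun a => ?_
        simp only [List.not_mem_nil, iff_false]
        intro hmem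
        exact hc ((hinv (c, a)).mp hmem).1
      rw [hblock]
      simp only [pvDf, if_neg hc, List.flatMap_cons]
      refine congrArg _ (ih (cs ++ [c]) _ fun p => ?_)
      simp only [List.mem_append, hinv p, List.mem_map, List.mem_singleton]
      constructor
      · rintro (⟨h1, h2⟩ | ⟨a, ha, rfl⟩)
        · exact ⟨Or.inl h1, h2⟩
        · exact ⟨Or.inr rfl, (pvDf_mem l0 [] a).mp ha |>.1⟩
      · rintro ⟨h1 | rfl, h2⟩
        · exact Or.inl ⟨h1, h2⟩
        · exact Or.inr ⟨p.2, (pvDf_mem l0 [] p.2).mpr ⟨h2, by simp⟩, rfl⟩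

def pvPeel (t : Int) : List Int → List (Int × Int)
  | [] => []
  | a :: rest =>
    let b := (a :: rest).getLast (by simp)
    if a + b = t then (a, b) :: pvPeel t rest.dropLast
    else if a + b < t then pvPeel t rest
    else pvPeel t ((a :: rest).dropLast)
termination_by l => l.length
decreasing_by all_goals simp

theorem pvTwoPtr_eq_peel (D : List Int) (t : Int) :
    ∀ (i j : Int), 0 ≤ i → j < (D.length : Int) →
      pvTwoPtr D t i j = pvPeel t ((D.drop i.toNat).take (j + 1 - i).toNat) := by
  intro i j
  induction hn : (j + 1 - i).toNat using Nat.strong_induction_on generalizing i j with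
  | _ n IH =>
  intro hi hj
  subst hn
  by_cases hij : i ≤ j
  case neg =>
    rw [pvTwoPtr, dif_neg hij, show (j + 1 - i).toNat = 0 by omega]
    simp [pvPeel]
  case pos =>
  have hlen : ((D.drop i.toNat).take (j + 1 - i).toNat).length = (j + 1 - i).toNat := by
    simp; omega
  have hne : (D.drop i.toNat).take (j + 1 - i).toNat ≠ [] := by
    intro h0; rw [h0] at hlen; simp at hlen; omega
  obtain ⟨a0, M', hM⟩ := List.exists_cons_of_ne_nil hne
  have ha0 : a0 = D[i.toNat]'(by omega) := by
    have h2 : ((D.drop i.toNat).take (j + 1 - i).toNat)[0]? = some a0 := by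
      rw [hM]; rfl
    rw [List.getElem?_take_of_lt (by omega), List.getElem?_drop,
        List.getElem?_eq_getElem (by omega)] at h2
    simpa using h2.symm
  have hlast : (a0 :: M').getLast (by simp) = D[j.toNat]'(by omega) := by
    have h2 : ((D.drop i.toNat).take (j + 1 - i).toNat).getLast? =
        some ((a0 :: M').getLast (by simp)) := by
      rw [hM, List.getLast?_eq_some_getLast]
    rw [List.getLast?_eq_getElem?, hlen, List.getElem?_take_of_lt (by omega), List.getElem?_drop,
        List.getElem?_eq_getElem (by omega)] at h2
    have h3 : i.toNat + ((j + 1 - i).toNat - 1) = j.toNat := by omega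
    simp only [h3] at h2
    simpa using h2.symm
  have hga : PySem.List.pyGetD D i 0 = D[i.toNat]'(by omega) :=
    PySem.List.pyGetD_eq_getElem D 0 hi (by omega)
  have hgb : PySem.List.pyGetD D j 0 = D[j.toNat]'(by omega) :=
    PySem.List.pyGetD_eq_getElem D 0 (by omega) (by omega)
  rw [pvTwoPtr, dif_pos hij, hM, pvPeel]
  simp only [hga, hgb, hlast, ← ha0]
  -- slice identities
  have htail : M' = (D.drop (i+1).toNat).take (j + 1 - (i+1)).toNat := by
    have h1 : M' = ((D.drop i.toNat).take (j + 1 - i).toNat).tail := by rw [hM]; rfl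
    rw [h1, pvTake_tail, List.tail_drop, show i.toNat + 1 = (i+1).toNat by omega]
    congr 1; omega
  have hdplast : ((D.drop i.toNat).take (j + 1 - i).toNat).dropLast
      = (D.drop i.toNat).take ((j-1) + 1 - i).toNat := by
    rw [pvTake_dropLast _ _ (by simp; omega)]
    congr 1; omega
  set b := D[j.toNat]'(by omega) with hbdef
  by_cases h1 : a0 + b = t
  · rw [if_pos h1, if_pos h1]
    congr 1
    have : M'.dropLast = (D.drop (i+1).toNat).take ((j-1) + 1 - (i+1)).toNat := by
      rw [pvDropLast_cons_tail a0 M', ← hM, hdplast, pvTake_tail, List.tail_drop,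
          show i.toNat + 1 = (i+1).toNat by omega]
      congr 1; omega
    rw [this]
    exact IH ((j-1) + 1 - (i+1)).toNat (by omega) (i+1) (j-1) rfl (by omega) (by omega)
  · rw [if_neg h1, if_neg h1]
    by_cases h2 : a0 + b < t
    · rw [if_pos h2, if_pos h2, htail]
      exact IH (j + 1 - (i+1)).toNat (by omega) (i+1) j rfl (by omega) (by omega)
    · rw [if_neg h2, if_neg h2, ← hM, hdplast]
      exact IH ((j-1) + 1 - i).toNat (by omega) i (j-1) rfl (by omega) (by omega)

theorem pvPeel_eq_filter (t : Int) :
    ∀ (M : List Int), M.Pairwise (· < ·) →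
      pvPeel t M = (M.filter (fun a => decide ((t - a) ∈ M ∧ a ≤ t - a))).map (fun a => (a, t - a)) := by
  intro M
  induction hn : M.length using Nat.strong_induction_on generalizing M with
  | _ n IH =>
  subst hn
  intro hsort
  match M with
  | [] => simp [pvPeel]
  | [a] =>
    by_cases h : a + a = t
    · have ht : t - a = a := by omega
      simp [pvPeel, h, ht]
    · have hc : ¬ ((t - a) ∈ [a] ∧ a ≤ t - a) := by
        rintro ⟨h1, h2⟩
        rw [List.mem_singleton] at h1; omega
      simp [pvPeel, h, hc]
      intro he; omega
  | a :: r0 :: r1 =>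
    obtain ⟨mid, b, hsplit⟩ : ∃ mid b, r0 :: r1 = mid ++ [b] :=
      ⟨(r0 :: r1).dropLast, (r0 :: r1).getLast (by simp), (List.dropLast_append_getLast (by simp)).symm⟩
    rw [hsplit] at hsort ⊢
    have hmidne : mid ++ [b] ≠ [] := by simp
    -- ordering facts
    have halt : ∀ y ∈ mid ++ [b], a < y := fun y hy => List.rel_of_pairwise_cons hsort hy
    have hrsort : (mid ++ [b]).Pairwise (· < ·) := List.Pairwise.of_cons hsort
    have hmsort : mid.Pairwise (· < ·) := hrsort.sublist (List.sublist_append_left _ _)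
    have hltb : ∀ y ∈ mid, y < b := by
      intro y hy
      have h2 := List.pairwise_append.mp hrsort
      exact h2.2.2 y hy b (by simp)
    have hab : a < b := halt b (by simp)
    have hmem_le : ∀ y ∈ a :: (mid ++ [b]), y ≤ b := by
      intro y hy
      rcases List.mem_cons.mp hy with rfl | hy
      · omega
      · rcases List.mem_append.mp hy with hy | hy
        · exact le_of_lt (hltb y hy)
        · simp at hy; omega
    have hmem_ge : ∀ y ∈ a :: (mid ++ [b]), a ≤ y := by
      intro y hy
      rcases List.mem_cons.mp hy with rfl | hy
      · omega
      · exact le_of_lt (halt y hy)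
    have hLa : (a :: (mid ++ [b])).getLast (by simp) = b := by
      show ((a :: mid) ++ [b]).getLast (by simp) = b
      simp
    have hdl : (mid ++ [b]).dropLast = mid := by simp
    have hadl : (a :: (mid ++ [b])).dropLast = a :: mid := by
      rw [List.dropLast_cons_of_ne_nil hmidne, hdl]
    have hlenm : mid.length = r1.length := by
      have := congrArg List.length hsplit; simp at this; omega
    rw [pvPeel]
    simp only [hLa, hdl, hadl]
    by_cases h1 : a + b = t
    · rw [if_pos h1]
      have d1 : decide ((t - a) ∈ (a :: (mid ++ [b])) ∧ a ≤ t - a) = true := by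
        apply decide_eq_true
        refine ⟨?_, by omega⟩
        have hba : t - a = b := by omega
        rw [hba]; simp
      have d2 : decide ((t - b) ∈ (a :: (mid ++ [b])) ∧ b ≤ t - b) = false := by
        apply decide_eq_false
        rintro ⟨_, h2⟩; omega
      have hmc : ∀ y ∈ mid,
          decide ((t - y) ∈ (a :: (mid ++ [b])) ∧ y ≤ t - y)
            = decide ((t - y) ∈ mid ∧ y ≤ t - y) := by
        intro y hy
        rw [decide_eq_decide]
        constructor
        · rintro ⟨hm, hle⟩
          refine ⟨?_, hle⟩
          rcases List.mem_cons.mp hm with he | hm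
          · exfalso; have := halt y (by simp [hy]); omega
          · rcases List.mem_append.mp hm with hm | hm
            · exact hm
            · exfalso; simp at hm; have := halt y (by simp [hy]); omega
        · rintro ⟨hm, hle⟩
          exact ⟨by simp [hm], hle⟩
      rw [List.filter_cons, d1]
      simp only [if_true, List.filter_append, List.filter_cons, d2, List.filter_nil]
      rw [List.filter_congr hmc, List.map_cons]
      rw [IH mid.length (by simp; omega) mid rfl hmsort]
      have hfa : t - a = b := by omega
      simp [hfa]
    · rw [if_neg h1]
      by_cases h2 : a + b < t
      · rw [if_pos h2]
        have d1 : decide ((t - a) ∈ (a :: (mid ++ [b])) ∧ a ≤ t - a) = false := by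
          apply decide_eq_false
          rintro ⟨hm, _⟩
          have := hmem_le _ hm; omega
        have hrc : ∀ y ∈ mid ++ [b],
            decide ((t - y) ∈ (a :: (mid ++ [b])) ∧ y ≤ t - y)
              = decide ((t - y) ∈ (mid ++ [b]) ∧ y ≤ t - y) := by
          intro y hy
          rw [decide_eq_decide]
          constructor
          · rintro ⟨hm, hle⟩
            refine ⟨?_, hle⟩
            rcases List.mem_cons.mp hm with he | hm
            · exfalso; have := halt y hy; omega
            · exact hm
          · rintro ⟨hm, hle⟩
            exact ⟨by simp [hm], hle⟩
        rw [List.filter_cons, d1]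
        simp only [Bool.false_eq_true, if_false]
        rw [List.filter_congr hrc]
        exact IH (mid ++ [b]).length (by simp; omega) (mid ++ [b]) rfl hrsort
      · rw [if_neg h2]
        have hgt : t < a + b := by omega
        have hccfull : ∀ y ∈ a :: (mid ++ [b]),
            decide ((t - y) ∈ (a :: (mid ++ [b])) ∧ y ≤ t - y)
              = decide ((t - y) ∈ (a :: mid) ∧ y ≤ t - y) := by
          intro y hy
          rw [decide_eq_decide]
          rcases List.mem_cons.mp hy with rfl | hy'
          · -- y = a
            constructor
            · rintro ⟨hm, hle⟩
              refine ⟨?_, hle⟩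
              rcases List.mem_cons.mp hm with he | hm
              · simp [he]
              · rcases List.mem_append.mp hm with hm | hm
                · simp [hm]
                · exfalso; simp at hm; omega
            · rintro ⟨hm, hle⟩
              rcases List.mem_cons.mp hm with he | hm
              · exact ⟨by simp [he], hle⟩
              · exact ⟨by simp [hm], hle⟩
          · rcases List.mem_append.mp hy' with hy2 | hy2
            · -- y ∈ mid
              have hay : a < y := halt y hy'
              constructor
              · rintro ⟨hm, hle⟩
                refine ⟨?_, hle⟩
                rcases List.mem_cons.mp hm with he | hm
                · simp [he]
                · rcases List.mem_append.mp hm with hm | hm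
                  · simp [hm]
                  · exfalso; simp at hm; omega
              · rintro ⟨hm, hle⟩
                rcases List.mem_cons.mp hm with he | hm
                · exact ⟨by simp [he], hle⟩
                · exact ⟨by simp [hm], hle⟩
            · -- y = b : both sides false via the second conjunct
              simp only [List.mem_singleton] at hy2
              subst hy2
              constructor
              · rintro ⟨_, hle⟩; omega
              · rintro ⟨_, hle⟩; omega
        rw [List.filter_congr hccfull]
        have hb0 : ([b].filter fun y => decide ((t - y) ∈ (a :: mid) ∧ y ≤ t - y)) = [] := by
          simp only [List.filter_cons, List.filter_nil]
          rw [decide_eq_false (by rintro ⟨_, hle⟩; omega)]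
          rfl
        have hfl : (List.filter (fun y => decide ((t - y) ∈ (a :: mid) ∧ y ≤ t - y)) (mid ++ [b]))
            = List.filter (fun y => decide ((t - y) ∈ (a :: mid) ∧ y ≤ t - y)) mid := by
          rw [List.filter_append, hb0, List.append_nil]
        have hamsort : (a :: mid).Pairwise (· < ·) :=
          hsort.sublist ((mid.sublist_append_left [b]).cons₂ a)
        rw [IH (a :: mid).length (by simp; omega) (a :: mid) rfl hamsort]
        simp only [List.filter_cons, hfl]

theorem pvW1_elems (g : (Int × Int) → Option (String × (Int × Int) × Option Int))
    (htag : ∀ p e, g p = some e → e.1 = "T1")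
    (l : List (Int × Int)) (e) (he : e ∈ l.filterMap g) : e.1 = "T1" := by
  obtain ⟨p, _, hp⟩ := List.mem_filterMap.mp he
  exact htag p e hp


-- abbreviations used only in the proof below
theorem pvMain (x : Int) (S : List Int) :
    get_witness_pairs x S = get_witness_pairs_alt x S := by
  -- names
  set L := PySem.List.sorted S (fun a => a) false with hL
  set D := PySem.List.sorted (PySem.Set.ofList S) (fun a => a) false with hDdef
  set g1 : Int × Int → Option (String × (Int × Int) × Option Int) :=
    fun p => if (S.contains (x + p.1 - p.2) ∧ x + p.1 - p.2 ≥ p.2) then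
      some ("T1", (p.2, x + p.1 - p.2), some p.1) else none with hg1
  set g2 : Int → Option (String × (Int × Int) × Option Int) :=
    fun a => if (S.contains (2 * x - a) ∧ 2 * x - a ≥ a) then
      some ("T2", (a, 2 * x - a), none) else none with hg2
  set pairs : List (Int × Int) := L.flatMap (fun c => L.map (fun a => (c, a))) with hpairs
  -- ===== A-side characterisation =====
  have hinner : ∀ c : Int,
      (fun (st2 : List (String × (Int × Int) × Option Int) × List (String × (Int × Int) × Option Int)) (a : Int) =>
        let b := x + c - a
        if S.contains b ∧ b ≥ a then
          let key : String × (Int × Int) × Option Int := ("T1", (a, b), some c)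
          if key ∈ st2.2 then st2 else (st2.1 ++ [key], PySem.Set.add st2.2 key)
        else st2)
      = fun st2 a => pvStep g1 st2 (c, a) := by
    intro c
    funext st a
    simp only [pvStep, hg1]
    by_cases hc : S.contains (x + c - a) ∧ x + c - a ≥ a
    · rw [if_pos hc, if_pos hc]
      by_cases hk : ("T1", (a, x + c - a), some c) ∈ st.2
      · simp [hk]
      · simp [hk, PySem.Set.add, List.contains_eq_mem, hk]
    · rw [if_neg hc, if_neg hc]
  have hstep2 :
      (fun (st : List (String × (Int × Int) × Option Int) × List (String × (Int × Int) × Option Int)) (a : Int) =>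
        let b := 2 * x - a
        if S.contains b ∧ b ≥ a then
          let key : String × (Int × Int) × Option Int := ("T2", (a, b), none)
          if key ∈ st.2 then st else (st.1 ++ [key], PySem.Set.add st.2 key)
        else st)
      = pvStep g2 := by
    funext st a
    simp only [pvStep, hg2]
    by_cases hc : S.contains (2 * x - a) ∧ 2 * x - a ≥ a
    · rw [if_pos hc, if_pos hc]
      by_cases hk : ("T2", (a, 2 * x - a), none) ∈ st.2
      · simp [hk]
      · simp [hk, PySem.Set.add, List.contains_eq_mem, hk]
    · rw [if_neg hc, if_neg hc]
  set W1 := pvEmit g1 [] pairs with hW1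
  have hA : get_witness_pairs x S = W1 ++ pvEmit g2 W1 L := by
    unfold get_witness_pairs
    simp only [← hL, hinner, hstep2]
    have h1 : List.foldl (fun st c => List.foldl (fun st2 a => pvStep g1 st2 (c, a)) st L) ([], []) L
        = pairs.foldl (pvStep g1) ([], []) := by
      rw [hpairs, List.foldl_flatMap]
      congr 1
      funext st c
      rw [List.foldl_map]
    rw [h1, pvFoldl_step_eq g1 pairs []]
    simp only [List.nil_append, ← hW1]
    rw [pvFoldl_step_eq g2 L W1]
  -- ===== dedup of sorted S is B's items list D =====
  have hDS : ∀ z : Int, z ∈ D ↔ z ∈ S := by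
    intro z
    rw [hDdef, PySem.List.mem_sorted, PySem.Set.mem_ofList]
  have hDeq : D = pvDf [] L := by
    rw [hDdef]
    apply PySem.List.sorted_eq_of_perm_of_pairwise_lt
    · refine (List.perm_ext_iff_of_nodup (pvDf_nodup _ _) (PySem.Set.nodup_ofList S)).mpr ?_
      intro z
      rw [pvDf_mem, PySem.Set.mem_ofList, hL, PySem.List.mem_sorted]
      simp
    · have hle : (pvDf [] L).Pairwise (fun a b => a ≤ b) :=
        ((PySem.List.sorted_pairwise S (fun a => a)).sublist (pvDf_sublist L [])).imp (fun h => h)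
      have hnd : (pvDf [] L).Nodup := pvDf_nodup L []
      exact (hnd.imp (fun {a b} h => h) |>.and hle).imp (fun ⟨hne, hle'⟩ => lt_of_le_of_ne hle' hne)
  have hDsort : D.Pairwise (· < ·) := by
    rw [hDdef]; exact PySem.List.sorted_ofList_pairwise_lt S
  -- ===== shape of the generators' outputs =====
  have hsome1 : ∀ y e, g1 y = some e → e = ("T1", (y.2, x + y.1 - y.2), some y.1) := by
    intro y e hy
    simp only [hg1] at hy
    by_cases h : S.contains (x + y.1 - y.2) = true ∧ x + y.1 - y.2 ≥ y.2
    · rw [if_pos h] at hy; exact (Option.some.inj hy).symm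
    · rw [if_neg h] at hy; cases hy
  have hsome2 : ∀ y e, g2 y = some e → e = ("T2", (y, 2 * x - y), none) := by
    intro y e hy
    simp only [hg2] at hy
    by_cases h : S.contains (2 * x - y) = true ∧ 2 * x - y ≥ y
    · rw [if_pos h] at hy; exact (Option.some.inj hy).symm
    · rw [if_neg h] at hy; cases hy
  have hinj1 : ∀ y z e, g1 y = some e → g1 z = some e → y = z := by
    intro y z e hy hz
    have h2 := (hsome1 y e hy).symm.trans (hsome1 z e hz)
    simp only [Prod.mk.injEq, Option.some.injEq, true_and] at h2
    exact Prod.ext h2.2 h2.1.1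
  have hinj2 : ∀ y z e, g2 y = some e → g2 z = some e → y = z := by
    intro y z e hy hz
    have h2 := (hsome2 y e hy).symm.trans (hsome2 z e hz)
    simp only [Prod.mk.injEq, true_and] at h2
    exact h2.1.1
  -- ===== A's T1 block over the dedup =====
  have hW1eq : W1 = (pvDf [] pairs).filterMap g1 := by
    rw [hW1]
    exact pvEmit_eq_df_filterMap g1 hinj1 pairs [] [] (by intro e y _ _; simp)
  have hpp : pvDf [] pairs = (pvDf [] L).flatMap (fun c => (pvDf [] L).map (fun a => (c, a))) := by
    rw [hpairs]
    exact pvDf_pairProd L L [] [] (by intro p; simp)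
  have htags : ∀ e ∈ W1, e.1 = "T1" := by
    intro e he
    rw [hW1eq] at he
    refine pvW1_elems g1 ?_ _ e he
    intro p e' hp
    rw [hsome1 p e' hp]
  have hT2 : pvEmit g2 W1 L = (pvDf [] L).filterMap g2 := by
    apply pvEmit_eq_df_filterMap g2 hinj2 L W1 []
    intro e y _ hg
    simp only [List.not_mem_nil, false_and, exists_false, iff_false]
    intro he
    have h1 := htags e he
    rw [hsome2 y e hg] at h1
    simp at h1
  rw [hA, hT2, hW1eq, hpp, ← hDeq]
  -- ===== B-side: unfold and reduce the two-pointer sweeps =====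
  have htp : ∀ t : Int, pvTwoPtr D t 0 ((D.length : Int) - 1)
      = (D.filter fun a => decide ((t - a) ∈ D ∧ a ≤ t - a)).map (fun a => (a, t - a)) := by
    intro t
    rw [pvTwoPtr_eq_peel D t 0 ((D.length : Int) - 1) le_rfl (by omega)]
    have h0 : (((D.length : Int) - 1) + 1 - 0).toNat = D.length := by omega
    rw [h0]
    simp only [Int.toNat_zero, List.drop_zero, List.take_length]
    exact pvPeel_eq_filter t D hDsort
  have halt : get_witness_pairs_alt x S
      = (D.flatMap fun c => (pvTwoPtr D (x + c) 0 ((D.length : Int) - 1)).map (fun p => ("T1", p, some c)))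
        ++ (pvTwoPtr D (2 * x) 0 ((D.length : Int) - 1)).map (fun p => ("T2", p, none)) := by
    simp only [get_witness_pairs_alt, PySem.List.len_eq, ← hDdef]
  rw [halt]
  -- ===== match the two sides componentwise =====
  have hcomp : ∀ (t : Int) (tag : String) (oc : Option Int),
      D.filterMap (fun a => if S.contains (t - a) = true ∧ t - a ≥ a
          then some ((tag, (a, t - a), oc) : String × (Int × Int) × Option Int) else none)
        = (pvTwoPtr D t 0 ((D.length : Int) - 1)).map (fun p => (tag, p, oc)) := by
    intro t tag oc
    rw [htp t, List.map_map,
      pvFilterMap_ite D (fun a => S.contains (t - a) = true ∧ t - a ≥ a) (fun a => (tag, (a, t - a), oc))]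
    congr 1
    apply List.filter_congr
    intro a _
    rw [decide_eq_decide]
    constructor
    · rintro ⟨h1, h2⟩
      exact ⟨(hDS _).mpr (by simpa using h1), by omega⟩
    · rintro ⟨h1, h2⟩
      exact ⟨by simpa using (hDS _).mp h1, by omega⟩
  rw [List.filterMap_flatMap]
  congr 1
  · congr 1
    funext c
    rw [List.filterMap_map]
    have hgc : (g1 ∘ fun a : Int => (c, a)) = fun a : Int =>
        if S.contains (x + c - a) = true ∧ x + c - a ≥ a
          then some (("T1", (a, x + c - a), some c) : String × (Int × Int) × Option Int) else none := by
      funext a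
      simp [hg1, Function.comp]
    rw [hgc]
    exact hcomp (x + c) "T1" (some c)
  · rw [hg2]
    exact hcomp (2 * x) "T2" none

-- ===== VERDICT (by name: the statement is the Claim_ definition above) =====
theorem get_witness_pairs_spec : Claim_equal_get_witness_pairs := by
  intro x S _
  unfold Spec_get_witness_pairs
  exact pvMain x S
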